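-- pv_equiv track=rewrite | github.com/glassus/aoc | day11/11_1_2.py | count_W
-- ===== SOURCE A (Python) =====
-- def count_W(tab, x, y):
--     while y>0:
--         y -= 1
--         if tab[x][y] == '#':
--             return 1
--         if tab[x][y] == 'L':
--             return 0
--     return 0
-- ===== SOURCE B (Python) =====
-- def count_W(tab, x, y):
--     if y <= 0:
--         return 0
--     i = j = -1
--     for k, c in enumerate(tab[x][:y]):
--         if c == '#':
--             i = k
--         elif c == 'L':
--             j = k
--     return 1 if i > j else 0
-- ===== Notes on version B (the rewrite author's own statement) =====
-- stated objective: alternative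
-- what changed: Replaces the backward early-exit index scan with one forward pass over the sliced prefix that records the last positions of '#' and 'L' and compares them.
import Mathlib
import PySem

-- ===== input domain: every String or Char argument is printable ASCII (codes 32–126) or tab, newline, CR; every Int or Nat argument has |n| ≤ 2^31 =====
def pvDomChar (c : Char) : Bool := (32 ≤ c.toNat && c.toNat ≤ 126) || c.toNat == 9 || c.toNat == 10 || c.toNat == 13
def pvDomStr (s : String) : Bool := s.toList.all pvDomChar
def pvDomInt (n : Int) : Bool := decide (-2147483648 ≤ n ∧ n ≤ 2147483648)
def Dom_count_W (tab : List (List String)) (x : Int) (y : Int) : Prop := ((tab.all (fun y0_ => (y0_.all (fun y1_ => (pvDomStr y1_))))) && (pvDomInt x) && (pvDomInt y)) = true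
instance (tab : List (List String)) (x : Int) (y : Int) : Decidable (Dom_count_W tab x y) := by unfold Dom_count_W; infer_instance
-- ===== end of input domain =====

-- B replaces A's backward early-exit scan by one forward pass recording last seat positions; same cost, alternative algorithm.

-- ===== PORT A =====
-- the while loop: fuel = y (as Nat), iteration with fuel n+1 inspects tab[x][n]
def count_W_loop (tab : List (List String)) (x : Int) : Nat → Int
  | 0 => 0
  | n + 1 =>
    match PySem.List.pyGet? tab x with
    | none => 0  -- Python raises IndexError here; excluded by Pre_count_W
    | some row =>
      match PySem.List.pyGet? row (n : Int) with
      | none => 0  -- Python raises IndexError here; excluded by Pre_count_W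
      | some c =>
        if c = "#" then 1
        else if c = "L" then 0
        else count_W_loop tab x n

def count_W (tab : List (List String)) (x : Int) (y : Int) : Int :=
  count_W_loop tab x y.toNat

-- ===== PORT B =====
def count_W_step (p : Int × Int) (kc : Int × String) : Int × Int :=
  if kc.2 = "#" then (kc.1, p.2) else if kc.2 = "L" then (p.1, kc.1) else p

def count_W_alt (tab : List (List String)) (x : Int) (y : Int) : Int :=
  if y ≤ 0 then 0
  else
    let h := PySem.List.slice (PySem.List.pyGetD tab x []) none (some y)
    let p := (PySem.List.enumerate h 0).foldl count_W_step (-1, -1)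
    if p.1 > p.2 then 1 else 0

-- ===== PRECONDITION & SPEC =====
-- Pre_ excludes exactly the inputs on which A raises IndexError: y > 0 with x out of range,
-- or y exceeding the length of row tab[x] (the first access tab[x][y-1] is then out of range).
def Pre_count_W (tab : List (List String)) (x : Int) (y : Int) : Prop :=
  y ≤ 0 ∨ (PySem.Raise.InRange tab.length x ∧ y ≤ ((PySem.List.pyGetD tab x []).length : Int))
instance (tab : List (List String)) (x : Int) (y : Int) : Decidable (Pre_count_W tab x y) := by
  unfold Pre_count_W; infer_instance

def pvWitness_count_W : List (List String) × Int × Int := ([["L", "#"]], 0, 2)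

def Spec_count_W (tab : List (List String)) (x : Int) (y : Int) (out : Int) : Prop := out = count_W_alt tab x y
instance (tab : List (List String)) (x : Int) (y : Int) (out : Int) : Decidable (Spec_count_W tab x y out) := by unfold Spec_count_W; infer_instance

-- ===== CLAIM (what is proved, stated in full; the proofs are below) =====
def Claim_equal_count_W : Prop := ∀ (tab : List (List String)) (x : Int) (y : Int), Dom_count_W tab x y → Pre_count_W tab x y → Spec_count_W tab x y (count_W tab x y)

-- ===== LEMMAS AND PROOFS =====

-- the fold's components stay below s + l.length (started below s)
theorem count_W_fold_lt (l : List String) (s : Int) (p : Int × Int)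
    (h1 : p.1 < s) (h2 : p.2 < s) :
    ((PySem.List.enumerate l s).foldl count_W_step p).1 < s + l.length ∧
    ((PySem.List.enumerate l s).foldl count_W_step p).2 < s + l.length := by
  induction l generalizing s p with
  | nil => simpa using ⟨h1, h2⟩
  | cons c t ih =>
    rw [PySem.List.enumerate_cons, List.foldl_cons]
    have := ih (s + 1) (count_W_step p (s, c))
      (by unfold count_W_step; split_ifs <;> simp <;> omega)
      (by unfold count_W_step; split_ifs <;> simp <;> omega)
    simp only [List.length_cons] at *
    constructor <;> [exact lt_of_lt_of_le this.1 (by push_cast; omega);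
                    exact lt_of_lt_of_le this.2 (by push_cast; omega)]

-- main invariant: backward scan over the first n cells = comparison of last positions
theorem count_W_loop_eq (tab : List (List String)) (x : Int) (row : List String)
    (hrow : PySem.List.pyGet? tab x = some row) (n : Nat) (hn : n ≤ row.length) :
    count_W_loop tab x n =
      (if ((PySem.List.enumerate (row.take n) 0).foldl count_W_step (-1, -1)).1 >
          ((PySem.List.enumerate (row.take n) 0).foldl count_W_step (-1, -1)).2
       then 1 else 0) := by
  induction n with
  | zero => simp [count_W_loop]
  | succ n ih =>
    have hlt : n < row.length := by omega
    have hget : PySem.List.pyGet? row (n : Int) = some row[n] :=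
      PySem.List.pyGet?_ofNat row n hlt
    have htake : row.take (n + 1) = row.take n ++ [row[n]] := by
      rw [List.take_add_one]; simp [List.getElem?_eq_getElem hlt]
    have hlen : (row.take n).length = n := List.length_take_of_le (by omega)
    have henum : PySem.List.enumerate (row.take (n + 1)) 0 =
        PySem.List.enumerate (row.take n) 0 ++ [((n : Int), row[n])] := by
      rw [htake, PySem.List.enumerate_append, hlen]
      simp [PySem.List.enumerate_cons]
    obtain ⟨i, j, hij⟩ : ∃ i j,
        (PySem.List.enumerate (row.take n) 0).foldl count_W_step (-1, -1) = (i, j) :=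
      ⟨_, _, rfl⟩
    have hinv := count_W_fold_lt (row.take n) 0 (-1, -1) (by norm_num) (by norm_num)
    rw [hij, hlen] at hinv
    have ihn := ih (by omega)
    rw [hij] at ihn
    rw [henum, List.foldl_append]
    simp only [List.foldl_cons, List.foldl_nil, hij]
    unfold count_W_loop
    simp only [hrow, hget]
    obtain ⟨hi, hj⟩ : i < (n : Int) ∧ j < (n : Int) := by simpa using hinv
    by_cases h1 : row[n] = "#"
    · simp [count_W_step, h1, show j < (n : Int) from hj]
    · by_cases h2 : row[n] = "L"
      · simp [count_W_step, h2, show ¬ ((n : Int) < i) from by omega]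
      · simp only [count_W_step, if_neg h1, if_neg h2]
        simpa using ihn

-- ===== VERDICT (by name: the statement is the Claim_ definition above) =====
theorem count_W_spec : Claim_equal_count_W := by
  intro tab x y _ hpre
  unfold Spec_count_W count_W count_W_alt
  rcases hpre with hy | ⟨hin, hlen⟩
  · have : y.toNat = 0 := by omega
    simp [this, count_W_loop, hy]
  · have hrow : PySem.List.pyGet? tab x = some (PySem.List.pyGetD tab x []) := by
      cases h : PySem.List.pyGet? tab x with
      | none => exact absurd ((PySem.List.pyGet?_eq_none_iff _ _).mp h) (by simpa using hin)
      | some v => simp [PySem.List.pyGetD, h]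
    set row := PySem.List.pyGetD tab x [] with hr
    by_cases hy : y ≤ 0
    · have : y.toNat = 0 := by omega
      simp [this, count_W_loop, hy]
    · have h0 : (0 : Int) ≤ y := by omega
      have hslice : PySem.List.slice row none (some y) = row.take y.toNat :=
        PySem.List.slice_to row h0
      have hn : y.toNat ≤ row.length := by omega
      simp only [if_neg hy, hslice]
      exact count_W_loop_eq tab x row hrow y.toNat hn
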